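-- pv_equiv track=rewrite | github.com/Mallory24/cae_modeling | eval/get_map_results.py | get_frames_vid_segs
-- ===== SOURCE A (Python) =====
-- def get_frames_vid_segs(result_vid_segs: set, eval_table: dict, data_split: str):
--
-- 	FN_frames_instances = {F: {'seen_verb': {}, 'unseen_verb': {}} for F in eval_table.keys()}
-- 	# divided by verb classes
--
-- 	for F in eval_table.keys():
-- 		for verb_cls in eval_table[F].keys():
-- 			for v in eval_table[F][verb_cls]:
-- 				for split in eval_table[F][verb_cls][v].keys():
-- 					if split == data_split:
-- 						for d in eval_table[F][verb_cls][v][split].keys():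
-- 							vid_segs = eval_table[F][verb_cls][v][split][d]
-- 							if verb_cls == 'seen classes':
-- 								if v not in FN_frames_instances[F]['seen_verb']:
-- 									FN_frames_instances[F]['seen_verb'][v] = set(vid_segs).intersection(result_vid_segs)
-- 								FN_frames_instances[F]['seen_verb'][v] |= set(vid_segs).intersection(result_vid_segs)
-- 							elif verb_cls == 'unseen classes':
-- 								if v not in FN_frames_instances[F]['unseen_verb']:
-- 									FN_frames_instances[F]['unseen_verb'][v] = set(vid_segs).intersection(result_vid_segs)
-- 								FN_frames_instances[F]['unseen_verb'][v] |= set(vid_segs).intersection(result_vid_segs)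
--
-- 	return FN_frames_instances
-- ===== SOURCE B (Python) =====
-- def get_frames_vid_segs(result_vid_segs: set, eval_table: dict, data_split: str):
-- 	CAT = {'seen classes': 'seen_verb', 'unseen classes': 'unseen_verb'}
-- 	# phase 1: flatten the nested table into a flat event list keyed by (frame, bucket, verb)
-- 	events = [((F, CAT[c], v), segs)
-- 	          for F, by_cls in eval_table.items()
-- 	          for c, verbs in by_cls.items() if c in CAT
-- 	          for v, by_split in verbs.items()
-- 	          for s, d_map in by_split.items() if s == data_split
-- 	          for segs in d_map.values()]
-- 	# phase 2: group the events, taking the union of the raw segment lists per key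
-- 	unions = {}
-- 	for key, segs in events:
-- 		unions[key] = unions.get(key, set()) | set(segs)
-- 	# phase 3: emit the nested result, intersecting each accumulated union once
-- 	out = {F: {'seen_verb': {}, 'unseen_verb': {}} for F in eval_table}
-- 	for (F, cat, v), u in unions.items():
-- 		out[F][cat][v] = u & result_vid_segs
-- 	return out
-- ===== Notes on version B (the rewrite author's own statement) =====
-- stated objective: alternative
-- what changed: A walks the nested table five levels deep, mutating a pre-built nested dict and intersecting every innermost segment list with result_vid_segs (twice); B is three staged passes over different shapes: it first flattens the table into a flat event list keyed by (frame, bucket, verb) triples, then groups the events in a single flat dict by unioning the raw segment lists per triple, and finally emits the nested result in one pass over that flat dict, intersecting each accumulated union with result_vid_segs exactly once.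
import Mathlib
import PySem

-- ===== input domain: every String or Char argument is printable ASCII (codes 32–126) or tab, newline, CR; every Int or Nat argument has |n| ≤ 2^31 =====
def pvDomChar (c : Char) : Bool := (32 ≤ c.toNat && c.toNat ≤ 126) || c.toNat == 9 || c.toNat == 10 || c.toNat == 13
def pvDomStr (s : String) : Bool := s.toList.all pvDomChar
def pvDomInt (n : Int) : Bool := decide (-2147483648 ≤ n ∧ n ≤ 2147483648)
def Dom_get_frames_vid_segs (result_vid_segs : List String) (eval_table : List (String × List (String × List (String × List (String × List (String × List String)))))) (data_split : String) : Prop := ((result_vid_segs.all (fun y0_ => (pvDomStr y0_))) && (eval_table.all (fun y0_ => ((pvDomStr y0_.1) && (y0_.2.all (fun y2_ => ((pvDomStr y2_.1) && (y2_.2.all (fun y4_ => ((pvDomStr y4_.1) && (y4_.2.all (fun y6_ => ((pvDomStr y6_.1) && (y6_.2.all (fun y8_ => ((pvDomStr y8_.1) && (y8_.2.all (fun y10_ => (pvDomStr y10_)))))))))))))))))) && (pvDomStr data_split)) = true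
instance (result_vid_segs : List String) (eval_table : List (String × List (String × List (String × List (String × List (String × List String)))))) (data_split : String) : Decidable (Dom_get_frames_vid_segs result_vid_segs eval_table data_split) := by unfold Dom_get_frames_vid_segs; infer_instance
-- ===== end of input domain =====

-- B replaces A's five-deep mutating walk (which intersects every innermost segment list with
-- result_vid_segs) by three staged passes over different shapes: flatten the table into a flat
-- event list keyed by (frame, bucket, verb) triples, group the events in one flat dict by
-- unioning the raw segment lists per triple, then emit the nested result intersecting each
-- accumulated union exactly once (objective: alternative).

-- ===== PORT A =====
def get_frames_vid_segs (result_vid_segs : List String) (eval_table : List (String × List (String × List (String × List (String × List (String × List String)))))) (data_split : String) : List (String × List (String × List (String × List String))) :=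
  -- FN_frames_instances = {F: {'seen_verb': {}, 'unseen_verb': {}} for F in eval_table.keys()}
  let FN0 : PySem.Dict String (PySem.Dict String (PySem.Dict String (PySem.Set String))) :=
    eval_table.foldl (fun acc Fp =>
      acc.insert Fp.1 ((PySem.Dict.empty.insert "seen_verb" PySem.Dict.empty).insert "unseen_verb" PySem.Dict.empty)) PySem.Dict.empty
  -- the nested walk; each hit mutates FN[F][cat][v]
  let FN := eval_table.foldl (fun acc Fp =>
    Fp.2.foldl (fun acc cp =>
      cp.2.foldl (fun acc vp =>
        vp.2.foldl (fun acc sp =>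
          if sp.1 == data_split then
            sp.2.foldl (fun acc dp =>
              if cp.1 == "seen classes" then
                acc.modify Fp.1 PySem.Dict.empty (fun d2 =>
                  d2.modify "seen_verb" PySem.Dict.empty (fun d3 =>
                    (if d3.contains vp.1 then d3
                     else d3.insert vp.1 (PySem.Set.inter (PySem.Set.ofList dp.2) result_vid_segs)).modify vp.1 PySem.Set.empty
                      (fun s => PySem.Set.union s (PySem.Set.inter (PySem.Set.ofList dp.2) result_vid_segs))))
              else if cp.1 == "unseen classes" then
                acc.modify Fp.1 PySem.Dict.empty (fun d2 =>
                  d2.modify "unseen_verb" PySem.Dict.empty (fun d3 =>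
                    (if d3.contains vp.1 then d3
                     else d3.insert vp.1 (PySem.Set.inter (PySem.Set.ofList dp.2) result_vid_segs)).modify vp.1 PySem.Set.empty
                      (fun s => PySem.Set.union s (PySem.Set.inter (PySem.Set.ofList dp.2) result_vid_segs))))
              else acc) acc
          else acc) acc) acc) acc) FN0
  FN.items.map (fun Fp => (Fp.1, Fp.2.items.map (fun np => (np.1, np.2.items))))

-- ===== PORT B =====
-- the CAT dict of Source B has the two fixed keys 'seen classes'/'unseen classes'; the membership
-- test 'c in CAT' and the lookup CAT[c] are ported as the two string comparisons (exact).
def get_frames_vid_segs_alt (result_vid_segs : List String) (eval_table : List (String × List (String × List (String × List (String × List (String × List String)))))) (data_split : String) : List (String × List (String × List (String × List String))) :=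
  -- phase 1: the flat event list [((F, CAT[c], v), segs), ...]
  let events : List ((String × String × String) × List String) :=
    eval_table.flatMap (fun Fp =>
      Fp.2.flatMap (fun cp =>
        if cp.1 == "seen classes" || cp.1 == "unseen classes" then
          cp.2.flatMap (fun vp =>
            vp.2.flatMap (fun sp =>
              if sp.1 == data_split then
                sp.2.map (fun dp => ((Fp.1, (if cp.1 == "seen classes" then "seen_verb" else "unseen_verb"), vp.1), dp.2))
              else []))
        else []))
  -- phase 2: unions[key] = unions.get(key, set()) | set(segs)
  let unions : PySem.Dict (String × String × String) (PySem.Set String) :=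
    events.foldl (fun u e =>
      u.insert e.1 (PySem.Set.union (u.getD e.1 PySem.Set.empty) (PySem.Set.ofList e.2))) PySem.Dict.empty
  -- phase 3: out = {F: {'seen_verb': {}, 'unseen_verb': {}} for F in eval_table}
  let out0 : PySem.Dict String (PySem.Dict String (PySem.Dict String (PySem.Set String))) :=
    eval_table.foldl (fun acc Fp =>
      acc.insert Fp.1 ((PySem.Dict.empty.insert "seen_verb" PySem.Dict.empty).insert "unseen_verb" PySem.Dict.empty)) PySem.Dict.empty
  -- for (F, cat, v), u in unions.items(): out[F][cat][v] = u & result_vid_segs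
  let out := unions.items.foldl (fun acc kv =>
      acc.modify kv.1.1 PySem.Dict.empty (fun d2 =>
        d2.modify kv.1.2.1 PySem.Dict.empty (fun d3 =>
          d3.insert kv.1.2.2 (PySem.Set.inter kv.2 result_vid_segs)))) out0
  out.items.map (fun Fp => (Fp.1, Fp.2.items.map (fun np => (np.1, np.2.items))))

-- ===== PRECONDITION & SPEC =====
-- Pre_ only states that the dict-typed argument is a well-formed Python dict: association-list
-- keys are pairwise distinct at every nesting level (a Python dict cannot hold duplicate keys),
-- so it excludes no input the Python function could actually receive.
def Pre_get_frames_vid_segs (result_vid_segs : List String) (eval_table : List (String × List (String × List (String × List (String × List (String × List String)))))) (data_split : String) : Prop :=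
  (eval_table.map Prod.fst).Nodup ∧
  ∀ Fp ∈ eval_table, (Fp.2.map Prod.fst).Nodup ∧
    ∀ cp ∈ Fp.2, (cp.2.map Prod.fst).Nodup ∧
      ∀ vp ∈ cp.2, (vp.2.map Prod.fst).Nodup ∧
        ∀ sp ∈ vp.2, (sp.2.map Prod.fst).Nodup
instance (result_vid_segs : List String) (eval_table : List (String × List (String × List (String × List (String × List (String × List String)))))) (data_split : String) : Decidable (Pre_get_frames_vid_segs result_vid_segs eval_table data_split) := by unfold Pre_get_frames_vid_segs; infer_instance

def pvWitness_get_frames_vid_segs : List String × (List (String × List (String × List (String × List (String × List (String × List String)))))) × String :=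
  (["s1", "s3"],
   [("f1", [("seen classes", [("run", [("val", [("d1", ["s1", "s2"]), ("d2", ["s3"])])])]),
            ("unseen classes", [("jump", [("val", [("d1", ["s2"])]), ("test", [])])])]),
    ("f2", [])],
   "val")

def Spec_get_frames_vid_segs (result_vid_segs : List String) (eval_table : List (String × List (String × List (String × List (String × List (String × List String)))))) (data_split : String) (out : List (String × List (String × List (String × List String)))) : Prop := out = get_frames_vid_segs_alt result_vid_segs eval_table data_split
instance (result_vid_segs : List String) (eval_table : List (String × List (String × List (String × List (String × List (String × List String)))))) (data_split : String) (out : List (String × List (String × List (String × List String)))) : Decidable (Spec_get_frames_vid_segs result_vid_segs eval_table data_split out) := by unfold Spec_get_frames_vid_segs; infer_instance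

-- ===== CLAIM (what is proved, stated in full; the proofs are below) =====
def Claim_equal_get_frames_vid_segs : Prop := ∀ (result_vid_segs : List String) (eval_table : List (String × List (String × List (String × List (String × List (String × List String)))))) (data_split : String), Dom_get_frames_vid_segs result_vid_segs eval_table data_split → Pre_get_frames_vid_segs result_vid_segs eval_table data_split → Spec_get_frames_vid_segs result_vid_segs eval_table data_split (get_frames_vid_segs result_vid_segs eval_table data_split)

-- ===== LEMMAS AND PROOFS =====

theorem pvModify_id {κ τ : Type} [BEq κ] [LawfulBEq κ] (d : PySem.Dict κ τ) (k : κ) (dflt : τ)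
    (hc : d.contains k = true) (hnd : d.keys.Nodup) : d.modify k dflt (fun t => t) = d := by
  obtain ⟨v, hv⟩ : ∃ v, d.get? k = some v := by
    rw [PySem.Dict.contains_eq_isSome_get?] at hc
    exact Option.isSome_iff_exists.mp hc
  have hgd : d.getD k dflt = v := PySem.Dict.getD_of_get?_eq_some d dflt hv
  have hmem : (k, v) ∈ d.items := PySem.Dict.mem_items_of_get?_eq_some d hv
  simp only [PySem.Dict.modify, PySem.Dict.insert, hc, if_true, hgd]
  apply PySem.Dict.ext
  simp only [PySem.Dict.items]
  conv_rhs => rw [← List.map_id d.items]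
  apply List.map_congr_left
  intro p hp
  by_cases h : p.1 = k
  · have : d.get? k = some p.2 := by
      have : (k, p.2) ∈ d.items := by rw [← h]; exact hp
      exact PySem.Dict.get?_of_mem_items d this hnd
    rw [hv] at this
    have hv2 : v = p.2 := Option.some_inj.mp this
    rw [show ((p.1 == k) = true) from beq_iff_eq.mpr h] 
    simp only [if_true]
    rw [hv2, ← h]
    rfl
  · simp [h]

theorem pvModify_modify {κ τ : Type} [BEq κ] [LawfulBEq κ] (d : PySem.Dict κ τ) (k : κ) (dflt : τ)
    (f g : τ → τ) : (d.modify k dflt f).modify k dflt g = d.modify k dflt (fun t => g (f t)) := by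
  have h := PySem.Dict.getD_modify_self d k dflt f
  simp only [PySem.Dict.modify] at *
  rw [h, PySem.Dict.insert_insert_self]

theorem pvNodup_keys_modify {κ τ : Type} [BEq κ] [LawfulBEq κ] (d : PySem.Dict κ τ) (k : κ) (dflt : τ)
    (f : τ → τ) (hnd : d.keys.Nodup) : (d.modify k dflt f).keys.Nodup := by
  have := PySem.Dict.nodup_keys_foldl_modify_key [()] (fun _ => k) dflt (fun _ _ => f) d hnd
  simpa using this

theorem pvHoist {κ τ γ : Type} [BEq κ] [LawfulBEq κ] (k : κ) (dflt : τ) (l : List γ)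
    (step : PySem.Dict κ τ → γ → PySem.Dict κ τ) (σ : γ → τ → τ)
    (hstep : ∀ d x, x ∈ l → d.contains k = true → d.keys.Nodup → step d x = d.modify k dflt (σ x)) :
    ∀ d : PySem.Dict κ τ, d.contains k = true → d.keys.Nodup →
      l.foldl step d = d.modify k dflt (fun t => l.foldl (fun t x => σ x t) t) := by
  induction l with
  | nil => intro d hc hnd; simp [pvModify_id d k dflt hc hnd]
  | cons x xs ih =>
    intro d hc hnd
    have hx : step d x = d.modify k dflt (σ x) := hstep d x (List.mem_cons_self) hc hnd
    have hc' : (d.modify k dflt (σ x)).contains k = true := by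
      rw [PySem.Dict.contains_modify]; simp
    have hnd' := pvNodup_keys_modify d k dflt (σ x) hnd
    have := ih (fun d x hx => hstep d x (List.mem_cons_of_mem _ hx)) (d.modify k dflt (σ x)) hc' hnd'
    simp only [List.foldl_cons, hx, this, pvModify_modify]

theorem pvModifyAt {κ τ : Type} [BEq κ] [LawfulBEq κ] (pre suf : List (κ × τ)) (k : κ) (v dflt : τ)
    (f : τ → τ) (hpre : ∀ p ∈ pre, ¬ (p.1 = k)) (hsuf : ∀ p ∈ suf, ¬ (p.1 = k)) :
    (PySem.Dict.mk (pre ++ (k, v) :: suf)).modify k dflt f = PySem.Dict.mk (pre ++ (k, f v) :: suf) := by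
  have hc : (PySem.Dict.mk (pre ++ (k, v) :: suf)).contains k = true := by
    simp [PySem.Dict.contains]
  have hg : (PySem.Dict.mk (pre ++ (k, v) :: suf)).get? k = some v := by
    simp only [PySem.Dict.get?, PySem.Dict.items]
    rw [List.find?_append]
    have : List.find? (fun p => p.1 == k) pre = none := by
      rw [List.find?_eq_none]
      intro p hp; simpa using hpre p hp
    simp [this]
  simp only [PySem.Dict.modify, PySem.Dict.insert, hc, if_true,
    PySem.Dict.getD_of_get?_eq_some _ dflt hg]
  congr 1
  simp only [PySem.Dict.items, List.map_append, List.map_cons]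
  have h1 : pre.map (fun p => if (p.1 == k) = true then (k, f v) else p) = pre :=
    List.map_congr_left (fun p hp => by simp [beq_iff_eq, hpre p hp]) |>.trans (List.map_id pre)
  have h2 : suf.map (fun p => if (p.1 == k) = true then (k, f v) else p) = suf :=
    List.map_congr_left (fun p hp => by simp [beq_iff_eq, hsuf p hp]) |>.trans (List.map_id suf)
  simp [h1, h2]

theorem pvUnion_self {α : Type} [BEq α] [LawfulBEq α] (s : PySem.Set α) : PySem.Set.union s s = s := by
  show PySem.Set.update s s = s
  rw [PySem.Set.update_eq_append_filter]
  have : List.filter (fun y => !s.contains y) (PySem.Set.ofList s) = [] := by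
    rw [List.filter_eq_nil_iff]
    intro y hy
    have hys : y ∈ s := (PySem.Set.mem_ofList s y).mp hy
    simp [PySem.Set.contains_iff]
    exact hys
  simp [this]

theorem pvTopFold {κ β τ : Type} [BEq κ] [LawfulBEq κ] (dflt : τ) (v0 : τ)
    (step : PySem.Dict κ τ → (κ × β) → PySem.Dict κ τ) (σ : (κ × β) → τ → τ) :
    ∀ (l : List (κ × β)), (∀ d q, q ∈ l → d.contains q.1 = true → d.keys.Nodup → step d q = d.modify q.1 dflt (σ q)) →
    ∀ pre : List (κ × τ), (∀ p ∈ pre, ∀ q ∈ l, ¬ (p.1 = q.1)) → (pre.map Prod.fst).Nodup → (l.map Prod.fst).Nodup →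
    l.foldl step (PySem.Dict.mk (pre ++ l.map (fun q => (q.1, v0)))) =
      PySem.Dict.mk (pre ++ l.map (fun q => (q.1, σ q v0))) := by
  intro l
  induction l with
  | nil => intro _ pre _ _ _; simp
  | cons q l ih =>
    intro hstep pre hdisj hndpre hndl
    have hndl' : (q.1 :: l.map Prod.fst).Nodup := by simpa using hndl
    have hq1 : q.1 ∉ l.map Prod.fst := (List.nodup_cons.mp hndl').1
    have hndtail : (l.map Prod.fst).Nodup := (List.nodup_cons.mp hndl').2
    have hkeys : (PySem.Dict.mk (pre ++ (q.1, v0) :: l.map (fun q => (q.1, v0)))).keys.Nodup := by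
      have he : (PySem.Dict.mk (pre ++ (q.1, v0) :: l.map (fun q => (q.1, v0)))).keys
          = pre.map Prod.fst ++ q.1 :: l.map Prod.fst := by
        simp [PySem.Dict.keys, PySem.Dict.items, Function.comp_def]
      rw [he, List.nodup_append]
      refine ⟨hndpre, hndl', ?_⟩
      intro a ha b hb
      obtain ⟨p, hp, rfl⟩ := List.mem_map.mp ha
      rcases List.mem_cons.mp hb with rfl | hbm
      · exact hdisj p hp q List.mem_cons_self
      · obtain ⟨r, hr, rfl⟩ := List.mem_map.mp hbm
        exact hdisj p hp r (List.mem_cons_of_mem _ hr)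
    have hc : (PySem.Dict.mk (pre ++ (q.1, v0) :: l.map (fun q => (q.1, v0)))).contains q.1 = true := by
      simp [PySem.Dict.contains]
    have hstep1 := hstep _ q List.mem_cons_self hc hkeys
    have hmod := pvModifyAt pre (l.map (fun q => (q.1, v0))) q.1 v0 dflt (σ q)
      (fun p hp => hdisj p hp q List.mem_cons_self)
      (fun p hp => by
        obtain ⟨r, hr, rfl⟩ := List.mem_map.mp hp
        intro h
        exact hq1 (List.mem_map.mpr ⟨r, hr, h⟩))
    simp only [List.map_cons, List.foldl_cons]
    rw [hstep1, hmod]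
    have := ih (fun d r hr => hstep d r (List.mem_cons_of_mem _ hr)) (pre ++ [(q.1, σ q v0)])
      (fun p hp r hr => by
        rcases List.mem_append.mp hp with h | h
        · exact hdisj p h r (List.mem_cons_of_mem _ hr)
        · simp only [List.mem_singleton] at h
          intro he
          rw [show p.1 = q.1 from by rw [h]] at he
          exact hq1 (by rw [he]; exact List.mem_map.mpr ⟨r, hr, rfl⟩))
      (by
        simp only [List.map_append, List.map_cons, List.map_nil, List.nodup_append]
        refine ⟨hndpre, List.nodup_singleton _, ?_⟩
        intro a ha b hb
        simp at hb
        rw [hb]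
        obtain ⟨p, hp, rfl⟩ := List.mem_map.mp ha
        exact hdisj p hp q List.mem_cons_self)
      hndtail
    simpa using this

theorem pvInterUnion {α : Type} [BEq α] [LawfulBEq α] (u : PySem.Set α) (s r : List α) :
    PySem.Set.union (PySem.Set.inter u r) (PySem.Set.inter (PySem.Set.ofList s) r)
      = PySem.Set.inter (PySem.Set.union u (PySem.Set.ofList s)) r := by
  show PySem.Set.update _ _ = _
  rw [PySem.Set.update_eq_append_filter]
  have hnd : (PySem.Set.inter (PySem.Set.ofList s) r).Nodup := by
    exact (PySem.Set.nodup_ofList s).filter _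
  rw [PySem.Set.ofList_eq_self_of_nodup _ hnd]
  show _ = PySem.Set.inter (PySem.Set.update u (PySem.Set.ofList s)) r
  rw [PySem.Set.update_eq_append_filter, PySem.Set.ofList_ofList]
  simp only [PySem.Set.inter, List.filter_append, List.filter_filter]
  congr 1
  apply List.filter_congr
  intro x hx
  simp only [PySem.Set.contains_eq_listContains, List.contains_iff_mem, List.mem_filter,
    PySem.Set.contains_iff, decide_eq_true_eq]
  by_cases h1 : x ∈ u <;> by_cases h2 : x ∈ r <;> simp [h1, h2]

-- ==== program-specific definitions ====
abbrev pvG3 := PySem.Dict String (PySem.Set String)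
abbrev pvG2 := PySem.Dict String pvG3
abbrev pvG1 := PySem.Dict String pvG2
abbrev pvL4 := List (String × List String)
abbrev pvL3 := List (String × pvL4)
abbrev pvL2 := List (String × pvL3)
abbrev pvL1 := List (String × pvL2)

def pvD3Step (rvs : List String) (v : String) (dp : String × List String) (d3 : pvG3) : pvG3 :=
  (if d3.contains v then d3
   else d3.insert v (PySem.Set.inter (PySem.Set.ofList dp.2) rvs)).modify v PySem.Set.empty
    (fun s => PySem.Set.union s (PySem.Set.inter (PySem.Set.ofList dp.2) rvs))

def pvD3Prog (rvs : List String) (ds : String) (vl : pvL2) (d3 : pvG3) : pvG3 :=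
  vl.foldl (fun d3 vp =>
    vp.2.foldl (fun d3 sp =>
      if sp.1 == ds then sp.2.foldl (fun d3 dp => pvD3Step rvs vp.1 dp d3) d3 else d3) d3) d3

def pvδ (rvs : List String) (ds : String) (vp : String × pvL3) : List (String × List String) :=
  if ((PySem.Dict.mk vp.2).getD ds []).isEmpty then []
  else [(vp.1, PySem.Set.inter
    (((PySem.Dict.mk vp.2).getD ds []).foldl (fun u dp => PySem.Set.union u (PySem.Set.ofList dp.2)) PySem.Set.empty) rvs)]

def pvBucket (verbs : pvL2) (data_split : String) (result_vid_segs : List String) : List (String × List String) :=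
  verbs.foldl (fun out vp =>
    let d_map := (PySem.Dict.mk vp.2).getD data_split []
    if d_map.isEmpty then out
    else out ++ [(vp.1, PySem.Set.inter
        (d_map.foldl (fun u dp => PySem.Set.union u (PySem.Set.ofList dp.2)) PySem.Set.empty)
        result_vid_segs)]) []

-- the canonical common value: per frame, per bucket, the per-verb once-intersected unions
def pvCanon (rvs : List String) (tbl : List (String × pvL1)) (ds : String) : List (String × List (String × List (String × List String))) :=
  tbl.map (fun q => (q.1,
    [("seen_verb", pvBucket ((PySem.Dict.mk q.2).getD "seen classes" []) ds rvs),
     ("unseen_verb", pvBucket ((PySem.Dict.mk q.2).getD "unseen classes" []) ds rvs)]))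

theorem pvFoldlId {α γ : Type} (l : List γ) (step : α → γ → α) (a : α)
    (h : ∀ b x, x ∈ l → step b x = b) : l.foldl step a = a := by
  induction l generalizing a with
  | nil => rfl
  | cons x xs ih => rw [List.foldl_cons, h a x List.mem_cons_self]; exact ih a (fun b y hy => h b y (List.mem_cons_of_mem _ hy))

theorem pvBucket_eq_flatMap (verbs : pvL2) (ds : String) (rvs : List String) :
    pvBucket verbs ds rvs = verbs.flatMap (pvδ rvs ds) := by
  suffices h : ∀ (vl : pvL2) (out : List (String × List String)),
      vl.foldl (fun out vp =>
        let d_map := (PySem.Dict.mk vp.2).getD ds []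
        if d_map.isEmpty then out
        else out ++ [(vp.1, PySem.Set.inter
            (d_map.foldl (fun u dp => PySem.Set.union u (PySem.Set.ofList dp.2)) PySem.Set.empty)
            rvs)]) out = out ++ vl.flatMap (pvδ rvs ds) by
    simpa [pvBucket] using h verbs []
  intro vl
  induction vl with
  | nil => intro out; simp
  | cons vp vl ih =>
    intro out
    rw [List.foldl_cons, List.flatMap_cons]
    by_cases he : ((PySem.Dict.mk vp.2).getD ds []).isEmpty
    · simp only [he, if_pos, pvδ, ih, List.append_assoc]
      simp [he]
    · simp only [pvδ, he, if_neg, ih, List.append_assoc]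
      simp [he]

theorem pvContains_mk_false {β : Type} (pre : List (String × β)) (v : String)
    (hv : ∀ p ∈ pre, ¬ (p.1 = v)) : (PySem.Dict.mk pre).contains v = false := by
  simp only [PySem.Dict.contains, PySem.Dict.items, List.any_eq_false]
  intro p hp
  simpa using hv p hp

theorem pvDFold (rvs : List String) (v : String) (dl : pvL4) :
    ∀ (pre : List (String × PySem.Set String)) (u : PySem.Set String), (∀ p ∈ pre, ¬ (p.1 = v)) →
    dl.foldl (fun d3 dp => pvD3Step rvs v dp d3) (PySem.Dict.mk (pre ++ [(v, PySem.Set.inter u rvs)]))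
      = PySem.Dict.mk (pre ++ [(v, PySem.Set.inter (dl.foldl (fun u dp => PySem.Set.union u (PySem.Set.ofList dp.2)) u) rvs)]) := by
  induction dl with
  | nil => intro pre u hv; rfl
  | cons dp dl ih =>
    intro pre u hv
    rw [List.foldl_cons]
    have hc : (PySem.Dict.mk (pre ++ [(v, PySem.Set.inter u rvs)])).contains v = true := by
      simp [PySem.Dict.contains]
    rw [show pvD3Step rvs v dp (PySem.Dict.mk (pre ++ [(v, PySem.Set.inter u rvs)]))
        = PySem.Dict.mk (pre ++ [(v, PySem.Set.inter (PySem.Set.union u (PySem.Set.ofList dp.2)) rvs)]) from by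
      unfold pvD3Step
      rw [hc, if_pos rfl]
      rw [pvModifyAt pre [] v _ _ _ hv (by simp)]
      rw [pvInterUnion]]
    rw [List.foldl_cons]
    exact ih pre (PySem.Set.union u (PySem.Set.ofList dp.2)) hv

theorem pvDFold_start (rvs : List String) (v : String) (dp : String × List String) (dl : pvL4)
    (pre : List (String × PySem.Set String)) (hv : ∀ p ∈ pre, ¬ (p.1 = v)) :
    (dp :: dl).foldl (fun d3 dp => pvD3Step rvs v dp d3) (PySem.Dict.mk pre)
      = PySem.Dict.mk (pre ++ [(v, PySem.Set.inter ((dp :: dl).foldl (fun u dp => PySem.Set.union u (PySem.Set.ofList dp.2)) PySem.Set.empty) rvs)]) := by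
  rw [List.foldl_cons, List.foldl_cons]
  have hc : (PySem.Dict.mk pre).contains v = false := pvContains_mk_false pre v hv
  have hu : PySem.Set.union PySem.Set.empty (PySem.Set.ofList dp.2) = PySem.Set.ofList dp.2 := by
    show PySem.Set.update [] _ = _
    rw [PySem.Set.update_nil_left, PySem.Set.ofList_ofList]
  have h1 : pvD3Step rvs v dp (PySem.Dict.mk pre)
      = PySem.Dict.mk (pre ++ [(v, PySem.Set.inter (PySem.Set.union PySem.Set.empty (PySem.Set.ofList dp.2)) rvs)]) := by
    unfold pvD3Step
    rw [hc, if_neg (by simp)]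
    have hins : (PySem.Dict.mk pre).insert v (PySem.Set.inter (PySem.Set.ofList dp.2) rvs)
        = PySem.Dict.mk (pre ++ [(v, PySem.Set.inter (PySem.Set.ofList dp.2) rvs)]) := by
      simp [PySem.Dict.insert, hc]
    rw [hins, pvModifyAt pre [] v _ _ _ hv (by simp), pvUnion_self, hu]
  rw [h1]
  exact pvDFold rvs v dl pre _ hv

theorem pvSplitFold (rvs : List String) (ds v : String) (sl : pvL3)
    (hnd : (sl.map Prod.fst).Nodup) :
    ∀ (pre : List (String × PySem.Set String)), (∀ p ∈ pre, ¬ (p.1 = v)) →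
    sl.foldl (fun d3 sp =>
        if sp.1 == ds then sp.2.foldl (fun d3 dp => pvD3Step rvs v dp d3) d3 else d3) (PySem.Dict.mk pre)
      = PySem.Dict.mk (pre ++ pvδ rvs ds (v, sl)) := by
  induction sl with
  | nil => intro pre hv; simp [pvδ, PySem.Dict.getD, PySem.Dict.get?]
  | cons sp sl ih =>
    intro pre hv
    have hnd2 : (sp.1 :: sl.map Prod.fst).Nodup := by simpa using hnd
    have hgd : (PySem.Dict.mk ((sp.1, sp.2) :: sl)).getD ds []
        = if sp.1 == ds then sp.2 else (PySem.Dict.mk sl).getD ds [] := by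
      simp only [PySem.Dict.getD, PySem.Dict.get?_mk_cons]
      by_cases h : sp.1 == ds <;> simp [h]
    rw [List.foldl_cons]
    by_cases h : sp.1 = ds
    · have hb : (sp.1 == ds) = true := beq_iff_eq.mpr h
      have hrest : ∀ sp' ∈ sl, ¬ (sp'.1 = ds) := by
        intro sp' hsp' he
        have : sp.1 ∈ sl.map Prod.fst := by
          rw [h, ← he]; exact List.mem_map.mpr ⟨sp', hsp', rfl⟩
        exact (List.nodup_cons.mp hnd2).1 this
      have hid : ∀ (d3 : pvG3), sl.foldl (fun d3 sp =>
          if sp.1 == ds then sp.2.foldl (fun d3 dp => pvD3Step rvs v dp d3) d3 else d3) d3 = d3 := by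
        intro d3
        exact pvFoldlId _ _ _ (fun b sp' hsp' => by simp [beq_iff_eq, hrest sp' hsp'])
      rw [hb, if_pos rfl]
      cases hsp2 : sp.2 with
      | nil =>
        simp only [List.foldl_nil]
        rw [hid]
        have : pvδ rvs ds (v, (sp.1, sp.2) :: sl) = [] := by
          simp [pvδ, PySem.Dict.getD, PySem.Dict.get?_mk_cons, hb, hsp2]
        simp [this]
      | cons dp dl =>
        rw [pvDFold_start rvs v dp dl pre hv, hid]
        congr 1
        have : pvδ rvs ds (v, (sp.1, sp.2) :: sl)
            = [(v, PySem.Set.inter ((dp :: dl).foldl (fun u dp => PySem.Set.union u (PySem.Set.ofList dp.2)) PySem.Set.empty) rvs)] := by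
          simp [pvδ, PySem.Dict.getD, PySem.Dict.get?_mk_cons, hb, hsp2]
        rw [this]
    · have hb : (sp.1 == ds) = false := by simp [h]
      rw [hb]
      simp only [Bool.false_eq_true, if_false]
      rw [ih (List.nodup_cons.mp hnd2).2 pre hv]
      congr 2
      simp [pvδ, PySem.Dict.getD, PySem.Dict.get?, List.find?_cons, hb]

theorem pvD3Prog_eval (rvs : List String) (ds : String) (vl : pvL2)
    (hnd : (vl.map Prod.fst).Nodup) (hsp : ∀ vp ∈ vl, (vp.2.map Prod.fst).Nodup) :
    ∀ (pre : List (String × PySem.Set String)), (∀ p ∈ pre, ∀ vp ∈ vl, ¬ (p.1 = vp.1)) →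
    pvD3Prog rvs ds vl (PySem.Dict.mk pre) = PySem.Dict.mk (pre ++ pvBucket vl ds rvs) := by
  induction vl with
  | nil => intro pre _; simp [pvD3Prog, pvBucket]
  | cons vp vl ih =>
    intro pre hdisj
    have hnd2 : (vp.1 :: vl.map Prod.fst).Nodup := by simpa using hnd
    unfold pvD3Prog
    rw [List.foldl_cons]
    rw [pvSplitFold rvs ds vp.1 vp.2 (hsp vp List.mem_cons_self) pre
      (fun p hp => hdisj p hp vp List.mem_cons_self)]
    have hδ : ∀ p ∈ pvδ rvs ds (vp.1, vp.2), p.1 = vp.1 := by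
      intro p hp
      unfold pvδ at hp
      by_cases he : ((PySem.Dict.mk vp.2).getD ds []).isEmpty <;> simp [he] at hp
      rw [hp]
    have := ih (List.nodup_cons.mp hnd2).2 (fun q hq => hsp q (List.mem_cons_of_mem _ hq))
      (pre ++ pvδ rvs ds (vp.1, vp.2))
      (fun p hp q hq => by
        rcases List.mem_append.mp hp with h | h
        · exact hdisj p h q (List.mem_cons_of_mem _ hq)
        · rw [hδ p h]
          intro he
          exact (List.nodup_cons.mp hnd2).1 (by rw [he]; exact List.mem_map.mpr ⟨q, hq, rfl⟩))
    unfold pvD3Prog at this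
    rw [this]
    rw [pvBucket_eq_flatMap, pvBucket_eq_flatMap, List.flatMap_cons, List.append_assoc]

theorem pvClassBody (rvs : List String) (ds name : String) (vl : pvL2) :
    ∀ (d2 : pvG2), d2.contains name = true → d2.keys.Nodup →
    vl.foldl (fun d2 vp =>
      vp.2.foldl (fun d2 sp =>
        if sp.1 == ds then
          sp.2.foldl (fun d2 dp => d2.modify name PySem.Dict.empty (fun d3 => pvD3Step rvs vp.1 dp d3)) d2
        else d2) d2) d2
    = d2.modify name PySem.Dict.empty (fun t => pvD3Prog rvs ds vl t) := by
  intro d2 hc hnd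
  have hs : ∀ (vp : String × pvL3) (d : pvG2), vp ∈ vl → d.contains name = true → d.keys.Nodup →
      vp.2.foldl (fun d2 sp =>
        if sp.1 == ds then
          sp.2.foldl (fun d2 dp => d2.modify name PySem.Dict.empty (fun d3 => pvD3Step rvs vp.1 dp d3)) d2
        else d2) d
      = d.modify name PySem.Dict.empty
          (fun t => vp.2.foldl (fun t sp => (if sp.1 == ds then (fun t => sp.2.foldl (fun t dp => pvD3Step rvs vp.1 dp t) t) else (fun t => t)) t) t) := by
    intro vp d _ hcd hndd
    apply pvHoist name PySem.Dict.empty vp.2 _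
      (fun sp => if sp.1 == ds then (fun t => sp.2.foldl (fun t dp => pvD3Step rvs vp.1 dp t) t) else (fun t => t))
      ?_ d hcd hndd
    intro d' sp _ hc' hnd'
    by_cases hds : (sp.1 == ds) = true
    · simp only [if_pos hds]
      exact pvHoist name PySem.Dict.empty sp.2 _ (fun dp => fun d3 => pvD3Step rvs vp.1 dp d3)
        (fun _ _ _ _ _ => rfl) d' hc' hnd'
    · simp only [if_neg hds]
      exact (pvModify_id d' name PySem.Dict.empty hc' hnd').symm
  have hfun : (fun (vp : String × pvL3) => fun (t : pvG3) => vp.2.foldl (fun t sp => (if sp.1 == ds then (fun t => sp.2.foldl (fun t dp => pvD3Step rvs vp.1 dp t) t) else (fun t => t)) t) t)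
      = fun vp t => vp.2.foldl (fun d3 sp => if sp.1 == ds then sp.2.foldl (fun d3 dp => pvD3Step rvs vp.1 dp d3) d3 else d3) t := by
    funext vp t
    congr 1
    funext d3 sp
    by_cases hds : (sp.1 == ds) = true
    · simp only [if_pos hds]
    · simp only [if_neg hds]
  have := pvHoist name PySem.Dict.empty vl _
    (fun vp => fun t => vp.2.foldl (fun t sp => (if sp.1 == ds then (fun t => sp.2.foldl (fun t dp => pvD3Step rvs vp.1 dp t) t) else (fun t => t)) t) t)
    (fun d vp hvp hcd hndd => hs vp d hvp hcd hndd) d2 hc hnd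
  rw [this, hfun]
  rfl

theorem pvD2Prog_eval (rvs : List String) (ds : String) (cl : pvL1) :
    ∀ (s u : pvG3),
    cl.foldl (fun d2 cp =>
      cp.2.foldl (fun d2 vp =>
        vp.2.foldl (fun d2 sp =>
          if sp.1 == ds then
            sp.2.foldl (fun d2 dp =>
              if cp.1 == "seen classes" then d2.modify "seen_verb" PySem.Dict.empty (fun d3 => pvD3Step rvs vp.1 dp d3)
              else if cp.1 == "unseen classes" then d2.modify "unseen_verb" PySem.Dict.empty (fun d3 => pvD3Step rvs vp.1 dp d3)
              else d2) d2
          else d2) d2) d2) (PySem.Dict.mk [("seen_verb", s), ("unseen_verb", u)])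
    = PySem.Dict.mk [("seen_verb", (cl.filter (fun cp => cp.1 == "seen classes")).foldl (fun d3 cp => pvD3Prog rvs ds cp.2 d3) s),
                     ("unseen_verb", (cl.filter (fun cp => cp.1 == "unseen classes")).foldl (fun d3 cp => pvD3Prog rvs ds cp.2 d3) u)] := by
  induction cl with
  | nil => intro s u; simp
  | cons cp cl ih =>
    intro s u
    rw [List.foldl_cons]
    by_cases hseen : cp.1 = "seen classes"
    · have hb : (cp.1 == "seen classes") = true := beq_iff_eq.mpr hseen
      have hc : (PySem.Dict.mk [("seen_verb", s), ("unseen_verb", u)] : pvG2).contains "seen_verb" = true := by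
        simp [PySem.Dict.contains]
      have hknd : (PySem.Dict.mk [("seen_verb", s), ("unseen_verb", u)] : pvG2).keys.Nodup := by
        simp [PySem.Dict.keys, PySem.Dict.items]
      have hbody := pvClassBody rvs ds "seen_verb" cp.2
        (PySem.Dict.mk [("seen_verb", s), ("unseen_verb", u)]) hc hknd
      simp only [hb, if_true]
      rw [hbody]
      rw [show (PySem.Dict.mk [("seen_verb", s), ("unseen_verb", u)] : pvG2)
          = PySem.Dict.mk ([] ++ ("seen_verb", s) :: [("unseen_verb", u)]) from rfl]
      rw [pvModifyAt [] [("unseen_verb", u)] "seen_verb" s PySem.Dict.empty _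
        (by simp) (by simp)]
      have := ih (pvD3Prog rvs ds cp.2 s) u
      simp only [List.nil_append] at this ⊢
      rw [this]
      simp [List.filter_cons, hb, hseen]
    · by_cases hun : cp.1 = "unseen classes"
      · have hb1 : (cp.1 == "seen classes") = false := by simp [hseen]
        have hb2 : (cp.1 == "unseen classes") = true := beq_iff_eq.mpr hun
        have hc : (PySem.Dict.mk [("seen_verb", s), ("unseen_verb", u)] : pvG2).contains "unseen_verb" = true := by
          simp [PySem.Dict.contains]
        have hknd : (PySem.Dict.mk [("seen_verb", s), ("unseen_verb", u)] : pvG2).keys.Nodup := by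
          simp [PySem.Dict.keys, PySem.Dict.items]
        have hbody := pvClassBody rvs ds "unseen_verb" cp.2
          (PySem.Dict.mk [("seen_verb", s), ("unseen_verb", u)]) hc hknd
        simp only [hb1, hb2, Bool.false_eq_true, if_false, if_true]
        rw [hbody]
        rw [show (PySem.Dict.mk [("seen_verb", s), ("unseen_verb", u)] : pvG2)
            = PySem.Dict.mk ([("seen_verb", s)] ++ ("unseen_verb", u) :: []) from rfl]
        rw [pvModifyAt [("seen_verb", s)] [] "unseen_verb" u PySem.Dict.empty _
          (by simp) (by simp)]
        have := ih s (pvD3Prog rvs ds cp.2 u)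
        simp only [List.singleton_append] at this ⊢
        rw [this]
        simp [List.filter_cons, hb1, hb2, hun]
      · have hb1 : (cp.1 == "seen classes") = false := by simp [hseen]
        have hb2 : (cp.1 == "unseen classes") = false := by simp [hun]
        have hid : cp.2.foldl (fun d2 vp =>
            vp.2.foldl (fun d2 sp =>
              if sp.1 == ds then
                sp.2.foldl (fun d2 dp =>
                  if cp.1 == "seen classes" then d2.modify "seen_verb" PySem.Dict.empty (fun d3 => pvD3Step rvs vp.1 dp d3)
                  else if cp.1 == "unseen classes" then d2.modify "unseen_verb" PySem.Dict.empty (fun d3 => pvD3Step rvs vp.1 dp d3)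
                  else d2) d2
              else d2) d2) (PySem.Dict.mk [("seen_verb", s), ("unseen_verb", u)])
            = PySem.Dict.mk [("seen_verb", s), ("unseen_verb", u)] := by
          apply pvFoldlId
          intro b vp _
          apply pvFoldlId
          intro b2 sp _
          by_cases h : sp.1 == ds <;> simp [h, hb1, hb2]
        rw [hid, ih]
        simp [List.filter_cons, hb1, hb2]

def pvD2Prog (rvs : List String) (ds : String) (cl : pvL1) (d2 : pvG2) : pvG2 :=
  cl.foldl (fun d2 cp =>
    cp.2.foldl (fun d2 vp =>
      vp.2.foldl (fun d2 sp =>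
        if sp.1 == ds then
          sp.2.foldl (fun d2 dp =>
            if cp.1 == "seen classes" then d2.modify "seen_verb" PySem.Dict.empty (fun d3 => pvD3Step rvs vp.1 dp d3)
            else if cp.1 == "unseen classes" then d2.modify "unseen_verb" PySem.Dict.empty (fun d3 => pvD3Step rvs vp.1 dp d3)
            else d2) d2
        else d2) d2) d2) d2

theorem pvFrameBody (rvs : List String) (ds F : String) (cl : pvL1) :
    ∀ acc : pvG1, acc.contains F = true → acc.keys.Nodup →
    cl.foldl (fun acc cp =>
      cp.2.foldl (fun acc vp =>
        vp.2.foldl (fun acc sp =>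
          if sp.1 == ds then
            sp.2.foldl (fun acc dp =>
              if cp.1 == "seen classes" then
                acc.modify F PySem.Dict.empty (fun d2 => d2.modify "seen_verb" PySem.Dict.empty (fun d3 => pvD3Step rvs vp.1 dp d3))
              else if cp.1 == "unseen classes" then
                acc.modify F PySem.Dict.empty (fun d2 => d2.modify "unseen_verb" PySem.Dict.empty (fun d3 => pvD3Step rvs vp.1 dp d3))
              else acc) acc
          else acc) acc) acc) acc
    = acc.modify F PySem.Dict.empty (fun t => pvD2Prog rvs ds cl t) := by
  intro acc hc hnd
  have hD : ∀ (cp : String × pvL2) (vp : String × pvL3) (sp : String × pvL4) (d : pvG1),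
      d.contains F = true → d.keys.Nodup →
      sp.2.foldl (fun acc dp =>
        if cp.1 == "seen classes" then
          acc.modify F PySem.Dict.empty (fun d2 => d2.modify "seen_verb" PySem.Dict.empty (fun d3 => pvD3Step rvs vp.1 dp d3))
        else if cp.1 == "unseen classes" then
          acc.modify F PySem.Dict.empty (fun d2 => d2.modify "unseen_verb" PySem.Dict.empty (fun d3 => pvD3Step rvs vp.1 dp d3))
        else acc) d
      = d.modify F PySem.Dict.empty (fun t => sp.2.foldl (fun t dp =>
          (fun d2 => if cp.1 == "seen classes" then d2.modify "seen_verb" PySem.Dict.empty (fun d3 => pvD3Step rvs vp.1 dp d3)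
           else if cp.1 == "unseen classes" then d2.modify "unseen_verb" PySem.Dict.empty (fun d3 => pvD3Step rvs vp.1 dp d3)
           else d2) t) t) := by
    intro cp vp sp d hcd hndd
    apply pvHoist F PySem.Dict.empty sp.2 _
      (fun dp => fun d2 => if cp.1 == "seen classes" then d2.modify "seen_verb" PySem.Dict.empty (fun d3 => pvD3Step rvs vp.1 dp d3)
         else if cp.1 == "unseen classes" then d2.modify "unseen_verb" PySem.Dict.empty (fun d3 => pvD3Step rvs vp.1 dp d3)
         else d2) ?_ d hcd hndd
    intro d' dp _ hc' hnd'
    by_cases c1 : (cp.1 == "seen classes") = true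
    · simp only [if_pos c1]
    · by_cases c2 : (cp.1 == "unseen classes") = true
      · simp only [if_neg c1, if_pos c2]
      · simp only [if_neg c1, if_neg c2]
        exact (pvModify_id d' F PySem.Dict.empty hc' hnd').symm
  have hS : ∀ (cp : String × pvL2) (vp : String × pvL3) (d : pvG1),
      d.contains F = true → d.keys.Nodup →
      vp.2.foldl (fun acc sp =>
        if sp.1 == ds then
          sp.2.foldl (fun acc dp =>
            if cp.1 == "seen classes" then
              acc.modify F PySem.Dict.empty (fun d2 => d2.modify "seen_verb" PySem.Dict.empty (fun d3 => pvD3Step rvs vp.1 dp d3))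
            else if cp.1 == "unseen classes" then
              acc.modify F PySem.Dict.empty (fun d2 => d2.modify "unseen_verb" PySem.Dict.empty (fun d3 => pvD3Step rvs vp.1 dp d3))
            else acc) acc
        else acc) d
      = d.modify F PySem.Dict.empty (fun t => vp.2.foldl (fun t sp =>
          (if sp.1 == ds then
            (fun t => sp.2.foldl (fun t dp =>
              (fun d2 => if cp.1 == "seen classes" then d2.modify "seen_verb" PySem.Dict.empty (fun d3 => pvD3Step rvs vp.1 dp d3)
               else if cp.1 == "unseen classes" then d2.modify "unseen_verb" PySem.Dict.empty (fun d3 => pvD3Step rvs vp.1 dp d3)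
               else d2) t) t)
           else (fun t => t)) t) t) := by
    intro cp vp d hcd hndd
    apply pvHoist F PySem.Dict.empty vp.2 _ _ ?_ d hcd hndd
    intro d' sp _ hc' hnd'
    by_cases hds : (sp.1 == ds) = true
    · simp only [if_pos hds]
      exact hD cp vp sp d' hc' hnd'
    · simp only [if_neg hds]
      exact (pvModify_id d' F PySem.Dict.empty hc' hnd').symm
  have hV : ∀ (cp : String × pvL2) (d : pvG1),
      d.contains F = true → d.keys.Nodup →
      cp.2.foldl (fun acc vp =>
        vp.2.foldl (fun acc sp =>
          if sp.1 == ds then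
            sp.2.foldl (fun acc dp =>
              if cp.1 == "seen classes" then
                acc.modify F PySem.Dict.empty (fun d2 => d2.modify "seen_verb" PySem.Dict.empty (fun d3 => pvD3Step rvs vp.1 dp d3))
              else if cp.1 == "unseen classes" then
                acc.modify F PySem.Dict.empty (fun d2 => d2.modify "unseen_verb" PySem.Dict.empty (fun d3 => pvD3Step rvs vp.1 dp d3))
              else acc) acc
          else acc) acc) d
      = d.modify F PySem.Dict.empty (fun t => cp.2.foldl (fun t vp =>
          (fun t => vp.2.foldl (fun t sp =>
            (if sp.1 == ds then
              (fun t => sp.2.foldl (fun t dp =>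
                (fun d2 => if cp.1 == "seen classes" then d2.modify "seen_verb" PySem.Dict.empty (fun d3 => pvD3Step rvs vp.1 dp d3)
                 else if cp.1 == "unseen classes" then d2.modify "unseen_verb" PySem.Dict.empty (fun d3 => pvD3Step rvs vp.1 dp d3)
                 else d2) t) t)
             else (fun t => t)) t) t) t) t) := by
    intro cp d hcd hndd
    apply pvHoist F PySem.Dict.empty cp.2 _ _ ?_ d hcd hndd
    intro d' vp _ hc' hnd'
    exact hS cp vp d' hc' hnd'
  have hfun : (fun (cp : String × pvL2) => fun (t : pvG2) => cp.2.foldl (fun t vp =>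
          (fun t => vp.2.foldl (fun t sp =>
            (if sp.1 == ds then
              (fun t => sp.2.foldl (fun t dp =>
                (fun d2 => if cp.1 == "seen classes" then d2.modify "seen_verb" PySem.Dict.empty (fun d3 => pvD3Step rvs vp.1 dp d3)
                 else if cp.1 == "unseen classes" then d2.modify "unseen_verb" PySem.Dict.empty (fun d3 => pvD3Step rvs vp.1 dp d3)
                 else d2) t) t)
             else (fun t => t)) t) t) t) t)
      = (fun cp t => cp.2.foldl (fun d2 vp =>
          vp.2.foldl (fun d2 sp =>
            if sp.1 == ds then
              sp.2.foldl (fun d2 dp =>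
                if cp.1 == "seen classes" then d2.modify "seen_verb" PySem.Dict.empty (fun d3 => pvD3Step rvs vp.1 dp d3)
                else if cp.1 == "unseen classes" then d2.modify "unseen_verb" PySem.Dict.empty (fun d3 => pvD3Step rvs vp.1 dp d3)
                else d2) d2
            else d2) d2) t) := by
    funext cp t
    congr 1
    funext d2 vp
    beta_reduce
    congr 1
    funext d2' sp
    by_cases hds : (sp.1 == ds) = true
    · simp only [if_pos hds]
    · simp only [if_neg hds]
  have := pvHoist F PySem.Dict.empty cl _
    (fun cp => fun t => cp.2.foldl (fun t vp =>
          (fun t => vp.2.foldl (fun t sp =>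
            (if sp.1 == ds then
              (fun t => sp.2.foldl (fun t dp =>
                (fun d2 => if cp.1 == "seen classes" then d2.modify "seen_verb" PySem.Dict.empty (fun d3 => pvD3Step rvs vp.1 dp d3)
                 else if cp.1 == "unseen classes" then d2.modify "unseen_verb" PySem.Dict.empty (fun d3 => pvD3Step rvs vp.1 dp d3)
                 else d2) t) t)
             else (fun t => t)) t) t) t) t)
    (fun d cp hcp hcd hndd => hV cp d hcd hndd) acc hc hnd
  rw [this, hfun]
  rfl

theorem pvFilterKey {β : Type} (k : String) (l : List (String × β)) (hnd : (l.map Prod.fst).Nodup) :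
    l.filter (fun p => p.1 == k) = (List.find? (fun p => p.1 == k) l).toList := by
  induction l with
  | nil => rfl
  | cons p l ih =>
    have hnd2 : (p.1 :: l.map Prod.fst).Nodup := by simpa using hnd
    by_cases h : (p.1 == k) = true
    · have hrest : l.filter (fun p => p.1 == k) = [] := by
        rw [List.filter_eq_nil_iff]
        intro q hq hk
        apply (List.nodup_cons.mp hnd2).1
        rw [beq_iff_eq.mp h, ← beq_iff_eq.mp hk]
        exact List.mem_map.mpr ⟨q, hq, rfl⟩
      simp [List.filter_cons, List.find?_cons, h, hrest]
    · simp [List.filter_cons, List.find?_cons, h, ih (List.nodup_cons.mp hnd2).2]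

-- out0 / FN0: the initial two-empty-slot dict per frame
theorem pvOut0 (eval_table : List (String × pvL1)) (hnd1 : (eval_table.map Prod.fst).Nodup) :
    (eval_table.foldl (fun acc Fp => acc.insert Fp.1 ((PySem.Dict.empty.insert "seen_verb" PySem.Dict.empty).insert "unseen_verb" PySem.Dict.empty)) PySem.Dict.empty : pvG1)
      = PySem.Dict.mk ([] ++ eval_table.map (fun q => (q.1, PySem.Dict.mk [("seen_verb", PySem.Dict.empty), ("unseen_verb", PySem.Dict.empty)]))) := by
  apply PySem.Dict.ext
  rw [PySem.Dict.items_foldl_insert_fresh eval_table (fun q => q.1)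
    (fun _ => ((PySem.Dict.empty.insert "seen_verb" PySem.Dict.empty).insert "unseen_verb" PySem.Dict.empty))
    PySem.Dict.empty (fun a _ => rfl) hnd1]
  simp [PySem.Dict.empty]
  intro a b _
  rfl

theorem pvMainA (result_vid_segs : List String) (eval_table : List (String × pvL1)) (data_split : String)
    (hpre : Pre_get_frames_vid_segs result_vid_segs eval_table data_split) :
    get_frames_vid_segs result_vid_segs eval_table data_split = pvCanon result_vid_segs eval_table data_split := by
  obtain ⟨hnd1, hrest⟩ := hpre
  have hA : get_frames_vid_segs result_vid_segs eval_table data_split =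
    (eval_table.foldl (fun acc Fp =>
        Fp.2.foldl (fun acc cp =>
          cp.2.foldl (fun acc vp =>
            vp.2.foldl (fun acc sp =>
              if sp.1 == data_split then
                sp.2.foldl (fun acc dp =>
                  if cp.1 == "seen classes" then
                    acc.modify Fp.1 PySem.Dict.empty (fun d2 => d2.modify "seen_verb" PySem.Dict.empty (fun d3 => pvD3Step result_vid_segs vp.1 dp d3))
                  else if cp.1 == "unseen classes" then
                    acc.modify Fp.1 PySem.Dict.empty (fun d2 => d2.modify "unseen_verb" PySem.Dict.empty (fun d3 => pvD3Step result_vid_segs vp.1 dp d3))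
                  else acc) acc
              else acc) acc) acc) acc)
        (eval_table.foldl (fun acc Fp => acc.insert Fp.1 ((PySem.Dict.empty.insert "seen_verb" PySem.Dict.empty).insert "unseen_verb" PySem.Dict.empty)) PySem.Dict.empty)).items.map
      (fun Fp => (Fp.1, Fp.2.items.map (fun np => (np.1, np.2.items)))) := rfl
  rw [hA, pvOut0 eval_table hnd1]
  rw [pvTopFold PySem.Dict.empty (PySem.Dict.mk [("seen_verb", PySem.Dict.empty), ("unseen_verb", PySem.Dict.empty)]) _
    (fun q => fun t => pvD2Prog result_vid_segs data_split q.2 t) eval_table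
    (fun d q hq hc hnd => pvFrameBody result_vid_segs data_split q.1 q.2 d hc hnd)
    [] (by simp) (by simp) hnd1]
  show (eval_table.map (fun q => (q.1, pvD2Prog result_vid_segs data_split q.2 (PySem.Dict.mk [("seen_verb", PySem.Dict.empty), ("unseen_verb", PySem.Dict.empty)])))).map
      (fun Fp => (Fp.1, Fp.2.items.map (fun np => (np.1, np.2.items)))) = _
  rw [List.map_map]
  unfold pvCanon
  apply List.map_congr_left
  intro q hq
  obtain ⟨hndcls, hcls⟩ := hrest q hq
  simp only [Function.comp]
  have heval : pvD2Prog result_vid_segs data_split q.2 (PySem.Dict.mk [("seen_verb", PySem.Dict.empty), ("unseen_verb", PySem.Dict.empty)])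
      = PySem.Dict.mk [("seen_verb", (q.2.filter (fun cp => cp.1 == "seen classes")).foldl (fun d3 cp => pvD3Prog result_vid_segs data_split cp.2 d3) PySem.Dict.empty),
                       ("unseen_verb", (q.2.filter (fun cp => cp.1 == "unseen classes")).foldl (fun d3 cp => pvD3Prog result_vid_segs data_split cp.2 d3) PySem.Dict.empty)] :=
    pvD2Prog_eval result_vid_segs data_split q.2 PySem.Dict.empty PySem.Dict.empty
  rw [heval]
  have hslot : ∀ k : String, ((q.2.filter (fun cp => cp.1 == k)).foldl (fun d3 cp => pvD3Prog result_vid_segs data_split cp.2 d3) (PySem.Dict.empty : pvG3)).items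
      = pvBucket ((PySem.Dict.mk q.2).getD k []) data_split result_vid_segs := by
    intro k
    rw [pvFilterKey k q.2 hndcls]
    cases hfind : List.find? (fun p => p.1 == k) q.2 with
    | none =>
      have : (PySem.Dict.mk q.2).getD k [] = [] := by
        simp [PySem.Dict.getD, PySem.Dict.get?, hfind]
      rw [this]
      rfl
    | some cp0 =>
      have hmem : cp0 ∈ q.2 := List.mem_of_find?_eq_some hfind
      obtain ⟨hndverbs, hverbs⟩ := hcls cp0 hmem
      have : (PySem.Dict.mk q.2).getD k [] = cp0.2 := by
        simp [PySem.Dict.getD, PySem.Dict.get?, hfind]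
      rw [this]
      simp only [Option.toList]
      rw [List.foldl_cons, List.foldl_nil]
      have := pvD3Prog_eval result_vid_segs data_split cp0.2 hndverbs
        (fun vp hvp => (hverbs vp hvp).1) [] (by simp)
      rw [show (PySem.Dict.empty : pvG3) = PySem.Dict.mk [] from rfl, this]
      simp
  simp only [PySem.Dict.items, List.map_cons, List.map_nil]
  rw [hslot "seen classes", hslot "unseen classes"]

-- ==== B-side definitions (flatten / group / emit) ====
abbrev pvK := String × String × String
abbrev pvE := List (pvK × List String)
abbrev pvGU := PySem.Dict pvK (PySem.Set String)

def pvFoldU (l : pvE) (d : pvGU) : pvGU :=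
  l.foldl (fun u e => u.insert e.1 (PySem.Set.union (u.getD e.1 PySem.Set.empty) (PySem.Set.ofList e.2))) d

def pvCat (c : String) : String := if c == "seen classes" then "seen_verb" else "unseen_verb"

def pvEvV (F c ds : String) (vp : String × pvL3) : pvE :=
  vp.2.flatMap (fun sp => if sp.1 == ds then sp.2.map (fun dp => ((F, pvCat c, vp.1), dp.2)) else [])

def pvEvC (F ds : String) (cp : String × pvL2) : pvE :=
  if cp.1 == "seen classes" || cp.1 == "unseen classes" then cp.2.flatMap (pvEvV F cp.1 ds) else []

def pvEvF (ds : String) (Fp : String × pvL1) : pvE := Fp.2.flatMap (pvEvC Fp.1 ds)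

def pvBRaw (ds : String) (vl : pvL2) : List (String × PySem.Set String) :=
  vl.flatMap (fun vp =>
    if ((PySem.Dict.mk vp.2).getD ds []).isEmpty then []
    else [(vp.1, ((PySem.Dict.mk vp.2).getD ds []).foldl (fun u dp => PySem.Set.union u (PySem.Set.ofList dp.2)) PySem.Set.empty)])

theorem pvFlatMap_congr {α β : Type} (l : List α) (f g : α → List β) (h : ∀ a ∈ l, f a = g a) :
    l.flatMap f = l.flatMap g := by
  induction l with
  | nil => rfl
  | cons a l ih =>
    rw [List.flatMap_cons, List.flatMap_cons, h a List.mem_cons_self,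
      ih (fun a ha => h a (List.mem_cons_of_mem _ ha))]

theorem pvFoldU_append (l1 l2 : pvE) (d : pvGU) : pvFoldU (l1 ++ l2) d = pvFoldU l2 (pvFoldU l1 d) := by
  unfold pvFoldU
  rw [List.foldl_append]

theorem pvGetD_mk_append {κ ν : Type} [BEq κ] [LawfulBEq κ] (pre suf : List (κ × ν)) (k : κ) (v : ν)
    (hpre : ∀ p ∈ pre, ¬ p.1 = k) :
    (PySem.Dict.mk (pre ++ suf)).getD k v = (PySem.Dict.mk suf).getD k v := by
  have hf : List.find? (fun p => p.1 == k) pre = none := by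
    rw [List.find?_eq_none]; intro p hp; simpa using hpre p hp
  simp [PySem.Dict.getD, PySem.Dict.get?, PySem.Dict.items, List.find?_append, hf]

theorem pvContains_mk_append {κ ν : Type} [BEq κ] [LawfulBEq κ] (pre suf : List (κ × ν)) (k : κ)
    (hpre : ∀ p ∈ pre, ¬ p.1 = k) :
    (PySem.Dict.mk (pre ++ suf)).contains k = (PySem.Dict.mk suf).contains k := by
  have hf : pre.any (fun p => p.1 == k) = false := by
    rw [List.any_eq_false]; intro p hp; simpa using hpre p hp
  simp only [PySem.Dict.contains, PySem.Dict.items, List.any_append, hf, Bool.false_or]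

theorem pvInsert_mk_append {κ ν : Type} [BEq κ] [LawfulBEq κ] (pre suf : List (κ × ν)) (k : κ) (v : ν)
    (hpre : ∀ p ∈ pre, ¬ p.1 = k) :
    (PySem.Dict.mk (pre ++ suf)).insert k v = PySem.Dict.mk (pre ++ ((PySem.Dict.mk suf).insert k v).items) := by
  have hcc := pvContains_mk_append pre suf k hpre
  by_cases hc : (PySem.Dict.mk suf).contains k = true
  · have hc2 : (PySem.Dict.mk (pre ++ suf)).contains k = true := by rw [hcc]; exact hc
    simp only [PySem.Dict.insert, hc, hc2, if_true]
    congr 1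
    simp only [PySem.Dict.items, List.map_append]
    congr 1
    exact (List.map_congr_left (fun p hp => by simp [beq_iff_eq, hpre p hp])).trans (List.map_id pre)
  · have hc2 : ¬ (PySem.Dict.mk (pre ++ suf)).contains k = true := by rw [hcc]; exact hc
    simp only [PySem.Dict.insert, if_neg hc, if_neg hc2]
    congr 1
    simp [List.append_assoc]

theorem pvFoldU_shift (l : pvE) : ∀ (pre suf : List (pvK × PySem.Set String)),
    (∀ e ∈ l, ∀ p ∈ pre, ¬ p.1 = e.1) →
    pvFoldU l (PySem.Dict.mk (pre ++ suf)) = PySem.Dict.mk (pre ++ (pvFoldU l (PySem.Dict.mk suf)).items) := by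
  induction l with
  | nil => intro pre suf _; rfl
  | cons e l ih =>
    intro pre suf hdis
    have hpre : ∀ p ∈ pre, ¬ p.1 = e.1 := fun p hp => hdis e List.mem_cons_self p hp
    have h1 : (PySem.Dict.mk (pre ++ suf)).insert e.1
          (PySem.Set.union ((PySem.Dict.mk (pre ++ suf)).getD e.1 PySem.Set.empty) (PySem.Set.ofList e.2))
        = PySem.Dict.mk (pre ++ ((PySem.Dict.mk suf).insert e.1
            (PySem.Set.union ((PySem.Dict.mk suf).getD e.1 PySem.Set.empty) (PySem.Set.ofList e.2))).items) := by
      rw [pvGetD_mk_append pre suf e.1 _ hpre]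
      exact pvInsert_mk_append pre suf e.1 _ hpre
    show pvFoldU l ((PySem.Dict.mk (pre ++ suf)).insert e.1
          (PySem.Set.union ((PySem.Dict.mk (pre ++ suf)).getD e.1 PySem.Set.empty) (PySem.Set.ofList e.2))) = _
    rw [h1]
    exact ih pre _ (fun e' he' p hp => hdis e' (List.mem_cons_of_mem _ he') p hp)

theorem pvFoldU_keys (l : pvE) (d : pvGU) (k : pvK) :
    k ∈ (pvFoldU l d).keys ↔ k ∈ d.keys ∨ k ∈ l.map (fun e => e.1) := by
  unfold pvFoldU
  rw [PySem.Dict.keys_foldl_insert_key l (fun e => e.1)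
    (fun u e => PySem.Set.union (u.getD e.1 PySem.Set.empty) (PySem.Set.ofList e.2)) d]
  exact PySem.Set.mem_update d.keys (l.map (fun e => e.1)) k

theorem pvItems_key (l : pvE) : ∀ p ∈ (pvFoldU l PySem.Dict.empty).items, ∃ e ∈ l, e.1 = p.1 := by
  intro p hp
  have hk : p.1 ∈ (pvFoldU l PySem.Dict.empty).keys := PySem.Dict.mem_keys_of_mem_items _ hp
  rcases (pvFoldU_keys l PySem.Dict.empty p.1).mp hk with h0 | h1
  · simp [PySem.Dict.keys_empty] at h0
  · obtain ⟨e, he, he1⟩ := List.mem_map.mp h1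
    exact ⟨e, he, he1⟩

theorem pvFoldU_blocks {α : Type} (xs : List α) (f : α → pvE)
    (hp : xs.Pairwise (fun a b => ∀ e ∈ f a, ∀ e' ∈ f b, ¬ e.1 = e'.1)) :
    (pvFoldU (xs.flatMap f) PySem.Dict.empty).items
      = xs.flatMap (fun x => (pvFoldU (f x) PySem.Dict.empty).items) := by
  induction xs with
  | nil => rfl
  | cons x xs ih =>
    obtain ⟨hx, hp'⟩ := List.pairwise_cons.mp hp
    have hdis : ∀ e ∈ xs.flatMap f, ∀ p ∈ (pvFoldU (f x) PySem.Dict.empty).items, ¬ p.1 = e.1 := by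
      intro e he p hp2 hEq
      obtain ⟨b, hb, hbe⟩ := List.mem_flatMap.mp he
      obtain ⟨e', he', he1'⟩ := pvItems_key (f x) p hp2
      exact (hx b hb e' he' e hbe) (by rw [he1', hEq])
    have hsplit : pvFoldU ((x :: xs).flatMap f) PySem.Dict.empty
        = PySem.Dict.mk ((pvFoldU (f x) PySem.Dict.empty).items ++ (pvFoldU (xs.flatMap f) PySem.Dict.empty).items) := by
      rw [List.flatMap_cons, pvFoldU_append]
      have := pvFoldU_shift (xs.flatMap f) (pvFoldU (f x) PySem.Dict.empty).items [] hdis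
      rw [List.append_nil] at this
      exact this
    rw [hsplit, List.flatMap_cons, ← ih hp']

theorem pvFoldU_const (k : pvK) (dl : pvL4) : ∀ u : PySem.Set String,
    pvFoldU (dl.map (fun dp => (k, dp.2))) (PySem.Dict.mk [(k, u)])
      = PySem.Dict.mk [(k, dl.foldl (fun u dp => PySem.Set.union u (PySem.Set.ofList dp.2)) u)] := by
  induction dl with
  | nil => intro u; rfl
  | cons dp dl ih =>
    intro u
    have hg : (PySem.Dict.mk [(k, u)] : pvGU).getD k PySem.Set.empty = u := by
      simp [PySem.Dict.getD, PySem.Dict.get?]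
    have hi : (PySem.Dict.mk [(k, u)] : pvGU).insert k (PySem.Set.union u (PySem.Set.ofList dp.2))
        = PySem.Dict.mk [(k, PySem.Set.union u (PySem.Set.ofList dp.2))] := by
      simp [PySem.Dict.insert, PySem.Dict.contains]
    rw [List.map_cons]
    show pvFoldU (dl.map (fun dp => (k, dp.2)))
        ((PySem.Dict.mk [(k, u)]).insert k
          (PySem.Set.union ((PySem.Dict.mk [(k, u)]).getD k PySem.Set.empty) (PySem.Set.ofList dp.2))) = _
    rw [hg, hi]
    exact ih (PySem.Set.union u (PySem.Set.ofList dp.2))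

theorem pvFoldU_single (k : pvK) (dl : pvL4) :
    (pvFoldU (dl.map (fun dp => (k, dp.2))) PySem.Dict.empty).items
      = if dl.isEmpty then []
        else [(k, dl.foldl (fun u dp => PySem.Set.union u (PySem.Set.ofList dp.2)) PySem.Set.empty)] := by
  cases dl with
  | nil => rfl
  | cons dp dl =>
    have h0 : (PySem.Dict.empty : pvGU).insert k
          (PySem.Set.union ((PySem.Dict.empty : pvGU).getD k PySem.Set.empty) (PySem.Set.ofList dp.2))
        = PySem.Dict.mk [(k, PySem.Set.union PySem.Set.empty (PySem.Set.ofList dp.2))] := by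
      simp [PySem.Dict.insert, PySem.Dict.contains, PySem.Dict.getD, PySem.Dict.get?, PySem.Dict.empty]
    rw [List.map_cons]
    show (pvFoldU (dl.map (fun dp => (k, dp.2)))
        ((PySem.Dict.empty : pvGU).insert k
          (PySem.Set.union ((PySem.Dict.empty : pvGU).getD k PySem.Set.empty) (PySem.Set.ofList dp.2)))).items = _
    rw [h0, pvFoldU_const k dl]
    rfl

theorem pvFlatMapIf {β γ : Type} (k : String) (l : List (String × β)) (g : (String × β) → List γ)
    (hnd : (l.map Prod.fst).Nodup) :
    (l.flatMap fun p => if p.1 == k then g p else []) = (List.find? (fun p => p.1 == k) l).elim [] g := by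
  induction l with
  | nil => rfl
  | cons p l ih =>
    have hnd2 : (p.1 :: l.map Prod.fst).Nodup := by simpa using hnd
    rw [List.flatMap_cons]
    by_cases h : (p.1 == k) = true
    · have hrest : (l.flatMap fun q => if q.1 == k then g q else []) = [] := by
        rw [List.flatMap_eq_nil_iff]
        intro q hq
        have hqk : ¬ (q.1 == k) = true := fun hk => (List.nodup_cons.mp hnd2).1
          (by rw [beq_iff_eq.mp h, ← beq_iff_eq.mp hk]; exact List.mem_map.mpr ⟨q, hq, rfl⟩)
        simp [hqk]
      rw [if_pos h, hrest, List.append_nil]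
      simp [List.find?_cons, h]
    · simp only [h, Bool.false_eq_true, if_false, List.nil_append]
      rw [ih (List.nodup_cons.mp hnd2).2]
      simp [List.find?_cons, h]

theorem pvEvV_key (F c ds : String) (vp : String × pvL3) :
    ∀ e ∈ pvEvV F c ds vp, e.1 = (F, pvCat c, vp.1) := by
  intro e he
  unfold pvEvV at he
  obtain ⟨sp, _, he2⟩ := List.mem_flatMap.mp he
  by_cases h : (sp.1 == ds) = true
  · rw [if_pos h] at he2
    obtain ⟨dp, _, rfl⟩ := List.mem_map.mp he2
    rfl
  · rw [if_neg h] at he2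
    simp at he2

theorem pvEvC_key (F ds : String) (cp : String × pvL2) :
    ∀ e ∈ pvEvC F ds cp, e.1.1 = F ∧ e.1.2.1 = pvCat cp.1 ∧ (cp.1 = "seen classes" ∨ cp.1 = "unseen classes") := by
  intro e he
  unfold pvEvC at he
  by_cases h : (cp.1 == "seen classes" || cp.1 == "unseen classes") = true
  · rw [if_pos h] at he
    obtain ⟨vp, _, he2⟩ := List.mem_flatMap.mp he
    have hk := pvEvV_key F cp.1 ds vp e he2
    refine ⟨by rw [hk], by rw [hk], ?_⟩
    simpa [beq_iff_eq] using h
  · rw [if_neg h] at he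
    simp at he

theorem pvEvF_key (ds : String) (Fp : String × pvL1) :
    ∀ e ∈ pvEvF ds Fp, e.1.1 = Fp.1 ∧ (e.1.2.1 = "seen_verb" ∨ e.1.2.1 = "unseen_verb") := by
  intro e he
  unfold pvEvF at he
  obtain ⟨cp, _, he2⟩ := List.mem_flatMap.mp he
  obtain ⟨h1, h2, h3⟩ := pvEvC_key Fp.1 ds cp e he2
  refine ⟨h1, ?_⟩
  rcases h3 with h | h
  · left; rw [h2, h]; simp [pvCat]
  · right; rw [h2, h]; simp [pvCat]

theorem pvEvV_eq (F c ds : String) (vp : String × pvL3) (hnd : (vp.2.map Prod.fst).Nodup) :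
    pvEvV F c ds vp = ((PySem.Dict.mk vp.2).getD ds []).map (fun dp => ((F, pvCat c, vp.1), dp.2)) := by
  unfold pvEvV
  rw [pvFlatMapIf ds vp.2 (fun sp => sp.2.map (fun dp => ((F, pvCat c, vp.1), dp.2))) hnd]
  cases hfind : vp.2.find? (fun sp => sp.1 == ds) with
  | none => simp [PySem.Dict.getD, PySem.Dict.get?, PySem.Dict.items, hfind]
  | some sp => simp [PySem.Dict.getD, PySem.Dict.get?, PySem.Dict.items, hfind]

theorem pvBRaw_fst (ds : String) (vl : pvL2) :
    ((pvBRaw ds vl).map Prod.fst).Sublist (vl.map Prod.fst) := by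
  induction vl with
  | nil => simp [pvBRaw]
  | cons vp vl ih =>
    unfold pvBRaw
    rw [List.flatMap_cons, List.map_append, List.map_cons]
    by_cases h : ((PySem.Dict.mk vp.2).getD ds []).isEmpty
    · rw [if_pos h]
      exact List.Sublist.cons _ ih
    · rw [if_neg h]
      simp only [List.map_cons, List.map_nil, List.singleton_append]
      exact List.Sublist.cons₂ _ ih

theorem pvBucket_eq_mapBRaw (vl : pvL2) (ds : String) (rvs : List String) :
    pvBucket vl ds rvs = (pvBRaw ds vl).map (fun p => (p.1, PySem.Set.inter p.2 rvs)) := by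
  rw [pvBucket_eq_flatMap]
  unfold pvBRaw
  rw [List.map_flatMap]
  apply pvFlatMap_congr
  intro vp _
  by_cases h : ((PySem.Dict.mk vp.2).getD ds []).isEmpty
  · simp [pvδ, h]
  · simp [pvδ, h]

theorem pvClsItems (F ds c : String) (vl : pvL2) (hnd : (vl.map Prod.fst).Nodup)
    (hsp : ∀ vp ∈ vl, (vp.2.map Prod.fst).Nodup) :
    (pvFoldU (vl.flatMap (pvEvV F c ds)) PySem.Dict.empty).items
      = (pvBRaw ds vl).map (fun p => ((F, pvCat c, p.1), p.2)) := by
  have hpw : vl.Pairwise (fun a b => ∀ e ∈ pvEvV F c ds a, ∀ e' ∈ pvEvV F c ds b, ¬ e.1 = e'.1) := by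
    have h1 : vl.Pairwise (fun a b => ¬ a.1 = b.1) := List.pairwise_map.mp hnd
    refine h1.imp ?_
    intro a b hab e he e' he' hEq
    rw [pvEvV_key F c ds a e he, pvEvV_key F c ds b e' he'] at hEq
    exact hab (congrArg (fun t => t.2.2) hEq)
  rw [pvFoldU_blocks vl (pvEvV F c ds) hpw]
  unfold pvBRaw
  rw [List.map_flatMap]
  apply pvFlatMap_congr
  intro vp hvp
  rw [pvEvV_eq F c ds vp (hsp vp hvp), pvFoldU_single (F, pvCat c, vp.1) ((PySem.Dict.mk vp.2).getD ds [])]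
  by_cases h : ((PySem.Dict.mk vp.2).getD ds []).isEmpty
  · simp [h]
  · simp [h]

theorem pvFrameItems (ds : String) (Fp : String × pvL1) (hndc : (Fp.2.map Prod.fst).Nodup) :
    (pvFoldU (pvEvF ds Fp) PySem.Dict.empty).items
      = Fp.2.flatMap (fun cp => (pvFoldU (pvEvC Fp.1 ds cp) PySem.Dict.empty).items) := by
  unfold pvEvF
  apply pvFoldU_blocks
  have h1 : Fp.2.Pairwise (fun a b => ¬ a.1 = b.1) := List.pairwise_map.mp hndc
  refine h1.imp ?_
  intro a b hab e he e' he' hEq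
  obtain ⟨_, hcatA, hrelA⟩ := pvEvC_key Fp.1 ds a e he
  obtain ⟨_, hcatB, hrelB⟩ := pvEvC_key Fp.1 ds b e' he'
  have hcats : pvCat a.1 = pvCat b.1 := by
    rw [← hcatA, ← hcatB, hEq]
  rcases hrelA with ha | ha <;> rcases hrelB with hb | hb
  · exact hab (ha.trans hb.symm)
  · rw [ha, hb] at hcats; simp [pvCat] at hcats
  · rw [ha, hb] at hcats; simp [pvCat] at hcats
  · exact hab (ha.trans hb.symm)

theorem pvTwoSlot (rvs : List String) (l : List (pvK × PySem.Set String)) :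
    ∀ (s u : pvG3), (∀ kv ∈ l, kv.1.2.1 = "seen_verb" ∨ kv.1.2.1 = "unseen_verb") →
    l.foldl (fun t kv => t.modify kv.1.2.1 PySem.Dict.empty (fun d3 => d3.insert kv.1.2.2 (PySem.Set.inter kv.2 rvs)))
      (PySem.Dict.mk [("seen_verb", s), ("unseen_verb", u)])
    = PySem.Dict.mk
        [("seen_verb", (l.filter (fun kv => kv.1.2.1 == "seen_verb")).foldl (fun d3 kv => d3.insert kv.1.2.2 (PySem.Set.inter kv.2 rvs)) s),
         ("unseen_verb", (l.filter (fun kv => kv.1.2.1 == "unseen_verb")).foldl (fun d3 kv => d3.insert kv.1.2.2 (PySem.Set.inter kv.2 rvs)) u)] := by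
  induction l with
  | nil => intro s u _; rfl
  | cons kv l ih =>
    intro s u hcat
    rcases hcat kv List.mem_cons_self with h | h
    · have hb1 : (kv.1.2.1 == "seen_verb") = true := beq_iff_eq.mpr h
      have hb2 : (kv.1.2.1 == "unseen_verb") = false := by rw [h]; decide
      rw [List.foldl_cons, h]
      rw [show (PySem.Dict.mk [("seen_verb", s), ("unseen_verb", u)] : pvG2)
          = PySem.Dict.mk ([] ++ ("seen_verb", s) :: [("unseen_verb", u)]) from rfl]
      rw [pvModifyAt [] [("unseen_verb", u)] "seen_verb" s PySem.Dict.empty _ (by simp) (by simp)]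
      simp only [List.nil_append]
      rw [ih _ _ (fun q hq => hcat q (List.mem_cons_of_mem _ hq))]
      simp [List.filter_cons, hb1, hb2]
    · have hb1 : (kv.1.2.1 == "seen_verb") = false := by rw [h]; decide
      have hb2 : (kv.1.2.1 == "unseen_verb") = true := beq_iff_eq.mpr h
      rw [List.foldl_cons, h]
      rw [show (PySem.Dict.mk [("seen_verb", s), ("unseen_verb", u)] : pvG2)
          = PySem.Dict.mk ([("seen_verb", s)] ++ ("unseen_verb", u) :: []) from rfl]
      rw [pvModifyAt [("seen_verb", s)] [] "unseen_verb" u PySem.Dict.empty _ (by simp) (by simp)]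
      simp only [List.singleton_append]
      rw [ih _ _ (fun q hq => hcat q (List.mem_cons_of_mem _ hq))]
      simp [List.filter_cons, hb1, hb2]

theorem pvFilterCat (F ds : String) (cl : pvL1) (cls : String)
    (hcls : cls = "seen classes" ∨ cls = "unseen classes") :
    (cl.flatMap (fun cp => (pvFoldU (pvEvC F ds cp) PySem.Dict.empty).items)).filter (fun kv => kv.1.2.1 == pvCat cls)
      = cl.flatMap (fun cp => if cp.1 == cls then (pvFoldU (pvEvC F ds cp) PySem.Dict.empty).items else []) := by
  rw [List.filter_flatMap]
  apply pvFlatMap_congr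
  intro cp _
  by_cases hrel : (cp.1 == "seen classes" || cp.1 == "unseen classes") = true
  · by_cases heq : cp.1 = cls
    · have hall : ∀ p ∈ (pvFoldU (pvEvC F ds cp) PySem.Dict.empty).items, (p.1.2.1 == pvCat cls) = true := by
        intro p hp
        obtain ⟨e, he, hek⟩ := pvItems_key _ p hp
        obtain ⟨_, hcat, _⟩ := pvEvC_key F ds cp e he
        rw [← hek, hcat, heq]
        exact beq_self_eq_true _
      rw [List.filter_eq_self.mpr hall, if_pos (beq_iff_eq.mpr heq)]
    · have hne : pvCat cp.1 ≠ pvCat cls := by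
        rcases (by simpa [beq_iff_eq] using hrel : cp.1 = "seen classes" ∨ cp.1 = "unseen classes") with h2 | h2 <;>
          rcases hcls with h1 | h1 <;> rw [h1, h2] <;>
          first
          | exact absurd (h2.trans h1.symm) heq
          | simp [pvCat]
      have hnil : (pvFoldU (pvEvC F ds cp) PySem.Dict.empty).items.filter (fun kv => kv.1.2.1 == pvCat cls) = [] := by
        rw [List.filter_eq_nil_iff]
        intro p hp
        obtain ⟨e, he, hek⟩ := pvItems_key _ p hp
        obtain ⟨_, hcat, _⟩ := pvEvC_key F ds cp e he
        rw [← hek, hcat]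
        simpa using hne
      rw [hnil, if_neg (by simpa [beq_iff_eq] using heq)]
  · have hz : pvEvC F ds cp = [] := by unfold pvEvC; rw [if_neg hrel]
    have hni : ¬ cp.1 = cls := by
      intro hcc
      apply hrel
      rcases hcls with h | h <;> rw [hcc, h] <;> simp
    rw [hz, if_neg (by simpa [beq_iff_eq] using hni)]
    rfl

theorem pvSlotEval (rvs : List String) (ds : String) (q : String × pvL1)
    (hndcls : (q.2.map Prod.fst).Nodup)
    (hinner : ∀ cp ∈ q.2, (cp.2.map Prod.fst).Nodup ∧ ∀ vp ∈ cp.2, (vp.2.map Prod.fst).Nodup) :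
    ((pvFoldU (pvEvF ds q) PySem.Dict.empty).items.foldl
        (fun t kv => t.modify kv.1.2.1 PySem.Dict.empty (fun d3 => d3.insert kv.1.2.2 (PySem.Set.inter kv.2 rvs)))
        (PySem.Dict.mk [("seen_verb", PySem.Dict.empty), ("unseen_verb", PySem.Dict.empty)])).items.map
      (fun np => (np.1, np.2.items))
    = [("seen_verb", pvBucket ((PySem.Dict.mk q.2).getD "seen classes" []) ds rvs),
       ("unseen_verb", pvBucket ((PySem.Dict.mk q.2).getD "unseen classes" []) ds rvs)] := by
  have hcat : ∀ kv ∈ (pvFoldU (pvEvF ds q) PySem.Dict.empty).items,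
      kv.1.2.1 = "seen_verb" ∨ kv.1.2.1 = "unseen_verb" := by
    intro kv hkv
    obtain ⟨e, he, hek⟩ := pvItems_key _ kv hkv
    rcases (pvEvF_key ds q e he).2 with h | h
    · left; rw [← hek]; exact h
    · right; rw [← hek]; exact h
  rw [pvTwoSlot rvs _ PySem.Dict.empty PySem.Dict.empty hcat]
  have hslot : ∀ cls : String, cls = "seen classes" ∨ cls = "unseen classes" →
      (((pvFoldU (pvEvF ds q) PySem.Dict.empty).items.filter (fun kv => kv.1.2.1 == pvCat cls)).foldl
          (fun d3 kv => d3.insert kv.1.2.2 (PySem.Set.inter kv.2 rvs)) (PySem.Dict.empty : pvG3)).items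
        = pvBucket ((PySem.Dict.mk q.2).getD cls []) ds rvs := by
    intro cls hcl
    rw [pvFrameItems ds q hndcls, pvFilterCat q.1 ds q.2 cls hcl,
      pvFlatMapIf cls q.2 (fun cp => (pvFoldU (pvEvC q.1 ds cp) PySem.Dict.empty).items) hndcls]
    cases hfind : q.2.find? (fun cp => cp.1 == cls) with
    | none =>
      have hg : (PySem.Dict.mk q.2).getD cls [] = [] := by
        simp [PySem.Dict.getD, PySem.Dict.get?, PySem.Dict.items, hfind]
      rw [hg]
      rfl
    | some cp =>
      have hmem : cp ∈ q.2 := List.mem_of_find?_eq_some hfind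
      have hcp1 : (cp.1 == cls) = true := by
        have := List.find?_some hfind
        simpa using this
      obtain ⟨hndv, hspv⟩ := hinner cp hmem
      have hg : (PySem.Dict.mk q.2).getD cls [] = cp.2 := by
        simp [PySem.Dict.getD, PySem.Dict.get?, PySem.Dict.items, hfind]
      rw [hg]
      have hrel : (cp.1 == "seen classes" || cp.1 == "unseen classes") = true := by
        rcases hcl with h | h <;> rw [(beq_iff_eq.mp hcp1), h] <;> simp
      have hev : pvEvC q.1 ds cp = cp.2.flatMap (pvEvV q.1 cp.1 ds) := by
        unfold pvEvC; rw [if_pos hrel]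
      simp only [Option.elim]
      rw [hev, pvClsItems q.1 ds cp.1 cp.2 hndv hspv, List.foldl_map]
      have hfresh := PySem.Dict.items_foldl_insert_fresh (pvBRaw ds cp.2) (fun p => p.1)
        (fun p => PySem.Set.inter p.2 rvs) (PySem.Dict.empty : pvG3)
        (fun a _ => PySem.Dict.contains_empty _)
        ((pvBRaw_fst ds cp.2).nodup hndv)
      rw [show (List.foldl (fun d3 p => d3.insert ((q.1, pvCat cp.1, p.1) : pvK).2.2
            (PySem.Set.inter p.2 rvs)) (PySem.Dict.empty : pvG3) (pvBRaw ds cp.2))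
          = List.foldl (fun d p => d.insert p.1 (PySem.Set.inter p.2 rvs)) (PySem.Dict.empty : pvG3) (pvBRaw ds cp.2) from rfl]
      rw [hfresh, pvBucket_eq_mapBRaw]
      rfl
  have hc1 : pvCat "seen classes" = "seen_verb" := by decide
  have hc2 : pvCat "unseen classes" = "unseen_verb" := by decide
  have hs := hslot "seen classes" (Or.inl rfl)
  have hu := hslot "unseen classes" (Or.inr rfl)
  rw [hc1] at hs
  rw [hc2] at hu
  simp only [PySem.Dict.items, List.map_cons, List.map_nil]
  rw [hs, hu]

theorem pvMainB (result_vid_segs : List String) (eval_table : List (String × pvL1)) (data_split : String)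
    (hpre : Pre_get_frames_vid_segs result_vid_segs eval_table data_split) :
    get_frames_vid_segs_alt result_vid_segs eval_table data_split = pvCanon result_vid_segs eval_table data_split := by
  obtain ⟨hnd1, hrest⟩ := hpre
  have hB : get_frames_vid_segs_alt result_vid_segs eval_table data_split =
    ((pvFoldU (eval_table.flatMap (pvEvF data_split)) PySem.Dict.empty).items.foldl
        (fun acc kv => acc.modify kv.1.1 PySem.Dict.empty (fun d2 =>
          d2.modify kv.1.2.1 PySem.Dict.empty (fun d3 =>
            d3.insert kv.1.2.2 (PySem.Set.inter kv.2 result_vid_segs))))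
        (eval_table.foldl (fun acc Fp =>
          acc.insert Fp.1 ((PySem.Dict.empty.insert "seen_verb" PySem.Dict.empty).insert "unseen_verb" PySem.Dict.empty)) PySem.Dict.empty)).items.map
      (fun Fp => (Fp.1, Fp.2.items.map (fun np => (np.1, np.2.items)))) := rfl
  rw [hB]
  have hpw : eval_table.Pairwise (fun a b => ∀ e ∈ pvEvF data_split a, ∀ e' ∈ pvEvF data_split b, ¬ e.1 = e'.1) := by
    have h1 : eval_table.Pairwise (fun a b => ¬ a.1 = b.1) := List.pairwise_map.mp hnd1
    refine h1.imp ?_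
    intro a b hab e he e' he' hEq
    have hA := (pvEvF_key data_split a e he).1
    have hB2 := (pvEvF_key data_split b e' he').1
    exact hab (by rw [← hA, ← hB2, hEq])
  rw [pvFoldU_blocks eval_table (pvEvF data_split) hpw, List.foldl_flatMap, pvOut0 eval_table hnd1]
  rw [pvTopFold PySem.Dict.empty (PySem.Dict.mk [("seen_verb", PySem.Dict.empty), ("unseen_verb", PySem.Dict.empty)])
    (fun acc Fp => (pvFoldU (pvEvF data_split Fp) PySem.Dict.empty).items.foldl
      (fun acc kv => acc.modify kv.1.1 PySem.Dict.empty (fun d2 =>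
        d2.modify kv.1.2.1 PySem.Dict.empty (fun d3 =>
          d3.insert kv.1.2.2 (PySem.Set.inter kv.2 result_vid_segs)))) acc)
    (fun Fp t => (pvFoldU (pvEvF data_split Fp) PySem.Dict.empty).items.foldl
      (fun t kv => t.modify kv.1.2.1 PySem.Dict.empty (fun d3 =>
        d3.insert kv.1.2.2 (PySem.Set.inter kv.2 result_vid_segs))) t)
    eval_table
    (by
      intro d q hq hc hnd
      exact pvHoist q.1 PySem.Dict.empty
        ((pvFoldU (pvEvF data_split q) PySem.Dict.empty).items)
        (fun acc kv => acc.modify kv.1.1 PySem.Dict.empty (fun d2 =>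
          d2.modify kv.1.2.1 PySem.Dict.empty (fun d3 =>
            d3.insert kv.1.2.2 (PySem.Set.inter kv.2 result_vid_segs))))
        (fun kv t => t.modify kv.1.2.1 PySem.Dict.empty (fun d3 =>
          d3.insert kv.1.2.2 (PySem.Set.inter kv.2 result_vid_segs)))
        (fun d' kv hkv hc' hnd' => by
          obtain ⟨e, he, hek⟩ := pvItems_key _ kv hkv
          have hkF : kv.1.1 = q.1 := by rw [← hek]; exact (pvEvF_key data_split q e he).1
          beta_reduce
          rw [hkF]) d hc hnd)
    [] (by simp) (by simp) hnd1]
  simp only [List.nil_append, List.map_map]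
  unfold pvCanon
  apply List.map_congr_left
  intro q hq
  obtain ⟨hndcls, hcls⟩ := hrest q hq
  simp only [Function.comp]
  rw [pvSlotEval result_vid_segs data_split q hndcls
    (fun cp hcp => ⟨(hcls cp hcp).1, fun vp hvp => ((hcls cp hcp).2 vp hvp).1⟩)]

-- ===== VERDICT (by name: the statement is the Claim_ definition above) =====
theorem get_frames_vid_segs_spec : Claim_equal_get_frames_vid_segs := by
  intro result_vid_segs eval_table data_split _ hpre
  exact (pvMainA result_vid_segs eval_table data_split hpre).trans
    (pvMainB result_vid_segs eval_table data_split hpre).symm
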